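-- pv_equiv track=rewrite | github.com/junanida/Algorithm | 프로그래머스/0/120891. 369게임/369게임.py | solution
-- ===== SOURCE A (Python) =====
-- def solution(order):
--     answer = 0
--     plus = 10
--     while order > 0:
--         if order % plus == 3:
--             answer += 1
--         elif order % plus == 6:
--             answer += 1
--         elif order % plus == 9:
--             answer += 1
--         order = order // plus
--
--     return answer
-- ===== SOURCE B (Python) =====
-- def solution(order):
--     if order <= 0:
--         return 0
--     return sum(1 for c in str(order) if c in '369')
-- ===== Notes on version B (the rewrite author's own statement) =====
-- stated objective: idiomatic
-- what changed: Replaces the arithmetic digit-extraction while-loop with counting the clap digits among the characters of the decimal string representation, guarded to zero for non-positive input where A's loop never runs.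
import Mathlib
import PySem

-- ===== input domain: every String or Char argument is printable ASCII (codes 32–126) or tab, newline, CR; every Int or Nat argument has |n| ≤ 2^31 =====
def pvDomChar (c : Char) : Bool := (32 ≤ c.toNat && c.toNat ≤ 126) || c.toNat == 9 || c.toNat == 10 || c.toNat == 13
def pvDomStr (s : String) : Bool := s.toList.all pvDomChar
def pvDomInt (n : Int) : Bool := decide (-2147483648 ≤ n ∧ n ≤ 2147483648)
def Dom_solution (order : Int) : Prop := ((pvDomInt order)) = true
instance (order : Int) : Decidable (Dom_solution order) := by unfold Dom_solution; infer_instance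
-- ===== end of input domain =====

-- B replaces A's %/// digit-extraction while-loop with counting the characters '3'/'6'/'9'
-- of str(order) (guarded to 0 for non-positive input, where A's loop never runs) — idiomatic, same cost.

-- ===== PORT A =====
-- the while-loop of A: state is (order, answer); `plus` is the constant 10
def solutionLoop (order answer : Int) : Int :=
  if h : order > 0 then
    let answer' :=
      if PySem.Int.mod order 10 = 3 then answer + 1
      else if PySem.Int.mod order 10 = 6 then answer + 1
      else if PySem.Int.mod order 10 = 9 then answer + 1
      else answer
    solutionLoop (PySem.Int.floordiv order 10) answer'
  else answer
termination_by order.toNat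
decreasing_by
  have h10 : (0:Int) < 10 := by norm_num
  have := PySem.Int.floordiv_eq_ediv_of_pos (a := order) h10
  rw [this]
  omega

def solution (order : Int) : Int := solutionLoop order 0

-- ===== PORT B =====
def solution_alt (order : Int) : Int :=
  if order ≤ 0 then 0
  else
    ((PySem.Int.toChars order).countP
      (fun c => PySem.Chars.isIn [c] "369".toList) : Int)

-- ===== PRECONDITION & SPEC =====
def Spec_solution (order : Int) (out : Int) : Prop := out = solution_alt order
instance (order : Int) (out : Int) : Decidable (Spec_solution order out) := by unfold Spec_solution; infer_instance

-- ===== CLAIM (what is proved, stated in full; the proofs are below) =====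
def Claim_equal_solution : Prop := ∀ (order : Int), Dom_solution order → Spec_solution order (solution order)

-- ===== LEMMAS AND PROOFS =====

-- the shared digit predicate, on Nat digits
def pvD369 (d : Nat) : Bool := d == 3 || d == 6 || d == 9

-- B's char predicate agrees with pvD369 on decimal digit characters
lemma pv_isIn_digitChar (d : Nat) (hd : d < 10) :
    PySem.Chars.isIn [Nat.digitChar d] "369".toList = pvD369 d := by
  interval_cases d <;> decide

-- A-side loop invariant: for a Nat input, the loop counts the 3/6/9 digits of Nat.digits 10
lemma pv_loop_eq (m : Nat) : ∀ answer : Int,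
    solutionLoop (m : Int) answer = answer + ((Nat.digits 10 m).countP pvD369 : Int) := by
  induction m using Nat.strong_induction_on with
  | _ m ih =>
    intro answer
    rcases Nat.eq_zero_or_pos m with hm | hm
    · subst hm
      rw [solutionLoop]
      simp
    · rw [solutionLoop]
      have hpos : (m : Int) > 0 := by exact_mod_cast hm
      rw [dif_pos hpos]
      have hmod : PySem.Int.mod (m : Int) 10 = ((m % 10 : Nat) : Int) := by
        exact_mod_cast PySem.Int.mod_natCast m 10
      have hdiv : PySem.Int.floordiv (m : Int) 10 = ((m / 10 : Nat) : Int) := by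
        exact_mod_cast PySem.Int.floordiv_natCast m 10
      rw [hmod, hdiv, ih (m / 10) (Nat.div_lt_self hm (by norm_num))]
      rw [Nat.digits_def' (by norm_num : 1 < 10) hm]
      rw [List.countP_cons]
      have hrlt : m % 10 < 10 := Nat.mod_lt m (by norm_num)
      set r := m % 10 with hr
      interval_cases r <;> simp [pvD369] <;> ring

-- B-side: counting over Nat.toDigitsCore equals counting pvD369 over Nat.digits
lemma pv_toDigitsCore_countP (p : Char → Bool) (hp : ∀ d, d < 10 → p (Nat.digitChar d) = pvD369 d)
    (hp0 : p '0' = false) :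
    ∀ fuel m ds, m < fuel →
      (Nat.toDigitsCore 10 fuel m ds).countP p
        = (Nat.digits 10 m).countP pvD369 + ds.countP p := by
  intro fuel
  induction fuel with
  | zero => intro m ds h; omega
  | succ f ih =>
    intro m ds h
    simp only [Nat.toDigitsCore]
    by_cases hdz : m / 10 = 0
    · rw [if_pos hdz]
      rcases Nat.eq_zero_or_pos m with hm | hm
      · subst hm
        simp [hp0, Nat.digitChar]
      · rw [Nat.digits_def' (by norm_num : 1 < 10) hm, hdz]
        simp [List.countP_cons, hp (m % 10) (Nat.mod_lt m (by norm_num))]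
        omega
    · rw [if_neg hdz]
      have hmpos : 0 < m := by
        rcases Nat.eq_zero_or_pos m with hm | hm
        · subst hm; simp at hdz
        · exact hm
      have hlt : m / 10 < f := by
        have := Nat.div_lt_self hmpos (by norm_num : 1 < 10)
        omega
      rw [ih (m / 10) _ hlt]
      rw [Nat.digits_def' (by norm_num : 1 < 10) hmpos]
      simp [List.countP_cons, hp (m % 10) (Nat.mod_lt m (by norm_num))]
      omega

-- ===== VERDICT (by name: the statement is the Claim_ definition above) =====
theorem solution_spec : Claim_equal_solution := by
  intro order _
  unfold Spec_solution solution solution_alt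
  by_cases hpos : order > 0
  · rw [if_neg (by omega)]
    obtain ⟨m, hm⟩ : ∃ m : Nat, order = (m : Int) := ⟨order.toNat, by omega⟩
    subst hm
    have hmpos : 0 < m := by exact_mod_cast hpos
    rw [pv_loop_eq m 0]
    have htc : PySem.Int.toChars (m : Int) = Nat.toDigits 10 m := by
      unfold PySem.Int.toChars
      rw [if_neg (by omega)]
      simp
    rw [htc]
    unfold Nat.toDigits
    rw [pv_toDigitsCore_countP _ (fun d hd => pv_isIn_digitChar d hd) (by decide)
        (m + 1) m [] (by omega)]
    simp
  · rw [solutionLoop, dif_neg hpos, if_pos (by omega)]
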